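-- pv_equiv track=rewrite | github.com/konstdimasik/python_code | Advent of code/advent4.py | field_value_check_hlc
-- ===== SOURCE A (Python) =====
-- def field_value_check_hlc(field_value):
--     i = 0
--     for letter in field_value:
--         if i == 0 and letter == '#':
--             i += 1
--             continue
--         if letter.isdigit() or ('a' <= letter <= 'f'):
--             i += 1
--     if i == 7:
--         return True
--     return False
-- ===== SOURCE B (Python) =====
-- def field_value_check_hlc(field_value):
--     total = sum(1 for c in field_value if c.isdigit() or ('a' <= c <= 'f'))
--     for c in field_value:
--         if c.isdigit() or ('a' <= c <= 'f'):
--             break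
--         if c == '#':
--             total += 1
--             break
--     return total == 7
-- ===== Notes on version B (the rewrite author's own statement) =====
-- stated objective: simpler
-- what changed: Replaces A's single stateful loop with an i==0 flag by two independent passes: a pure count of hex-digit characters plus a short break-on-first scan that decides whether a hash sign precedes the first hex digit and earns the bonus.
import Mathlib
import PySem

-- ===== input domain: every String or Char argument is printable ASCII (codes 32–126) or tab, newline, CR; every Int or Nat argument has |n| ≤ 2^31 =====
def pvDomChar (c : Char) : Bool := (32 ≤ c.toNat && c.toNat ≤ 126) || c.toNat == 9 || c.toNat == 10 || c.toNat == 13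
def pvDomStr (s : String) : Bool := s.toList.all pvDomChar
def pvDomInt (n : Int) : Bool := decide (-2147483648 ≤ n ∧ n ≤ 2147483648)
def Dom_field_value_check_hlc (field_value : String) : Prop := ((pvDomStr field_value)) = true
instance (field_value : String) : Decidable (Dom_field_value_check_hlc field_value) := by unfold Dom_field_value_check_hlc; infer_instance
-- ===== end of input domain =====

-- B counts all hex-digit characters in one pass and adds the hash-sign bonus in a
-- separate short scan (bonus iff a hash sign precedes the first hex digit), replacing A's
-- single stateful loop; objective: simpler decomposition.

-- the shared character test `c.isdigit() or ('a' <= c <= 'f')`, verbatim in both Pythons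
def fvcHex (c : Char) : Bool := PySem.Chars.isdigit c || (decide ('a' ≤ c) && decide (c ≤ 'f'))

-- ===== PORT A =====
def field_value_check_hlc (field_value : String) : Bool :=
  let i : Int := field_value.toList.foldl
    (fun i letter =>
      if i = 0 ∧ letter = '#' then i + 1
      else if fvcHex letter then i + 1
      else i) 0
  if i = 7 then true else false

-- ===== PORT B =====
-- `for c in field_value: … break` second loop of Source B
def fvcBonusLoop : List Char → Int → Int
  | [], total => total
  | c :: rest, total =>
    if fvcHex c then total
    else if c = '#' then total + 1
    else fvcBonusLoop rest total

def field_value_check_hlc_alt (field_value : String) : Bool :=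
  let total : Int := field_value.toList.foldl (fun t c => if fvcHex c then t + 1 else t) 0
  let total := fvcBonusLoop field_value.toList total
  decide (total = 7)

-- ===== PRECONDITION & SPEC =====
def Spec_field_value_check_hlc (field_value : String) (out : Bool) : Prop := out = field_value_check_hlc_alt field_value
instance (field_value : String) (out : Bool) : Decidable (Spec_field_value_check_hlc field_value out) := by unfold Spec_field_value_check_hlc; infer_instance

-- ===== CLAIM (what is proved, stated in full; the proofs are below) =====
def Claim_equal_field_value_check_hlc : Prop := ∀ (field_value : String), Dom_field_value_check_hlc field_value → Spec_field_value_check_hlc field_value (field_value_check_hlc field_value)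

-- ===== LEMMAS AND PROOFS =====

-- A's loop step
def fvcStepA (i : Int) (letter : Char) : Int :=
  if i = 0 ∧ letter = '#' then i + 1
  else if fvcHex letter then i + 1
  else i

-- B's counting step
def fvcCnt (l : List Char) : Int := l.foldl (fun t c => if fvcHex c then t + 1 else t) 0

theorem fvcCnt_shift (l : List Char) (t : Int) :
    l.foldl (fun t c => if fvcHex c then t + 1 else t) t = t + fvcCnt l := by
  induction l generalizing t with
  | nil => simp [fvcCnt]
  | cons c rest ih =>
    simp only [fvcCnt, List.foldl_cons]
    rw [ih, ih]
    by_cases h : fvcHex c <;> simp [h] <;> try ring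

theorem fvcCnt_cons (c : Char) (l : List Char) :
    fvcCnt (c :: l) = (if fvcHex c then 1 else 0) + fvcCnt l := by
  have h1 : fvcCnt (c :: l) = l.foldl (fun t c => if fvcHex c then t + 1 else t)
      (if fvcHex c then 0 + 1 else 0) := rfl
  rw [h1, fvcCnt_shift]
  by_cases h : fvcHex c <;> simp [h]

theorem fvcA_pos (l : List Char) (i : Int) (hi : 1 ≤ i) :
    l.foldl fvcStepA i = i + fvcCnt l := by
  induction l generalizing i with
  | nil => simp [fvcCnt]
  | cons c rest ih =>
    have hne : ¬ (i = 0 ∧ c = '#') := by rintro ⟨h0, _⟩; omega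
    rw [List.foldl_cons, fvcCnt_cons]
    by_cases h : fvcHex c
    · rw [show fvcStepA i c = i + 1 from by simp [fvcStepA, hne, h]]
      rw [ih (i + 1) (by omega)]
      simp [h]
      ring
    · rw [show fvcStepA i c = i from by simp [fvcStepA, hne, h]]
      rw [ih i hi]
      simp [h]

theorem fvcHex_hash : fvcHex '#' = false := by decide

theorem fvcA_zero (l : List Char) (t : Int) :
    t + l.foldl fvcStepA 0 = fvcBonusLoop l (t + fvcCnt l) := by
  induction l generalizing t with
  | nil => simp [fvcCnt, fvcBonusLoop]
  | cons c rest ih =>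
    rw [List.foldl_cons, fvcCnt_cons]
    by_cases hh : c = '#'
    · subst hh
      rw [show fvcStepA 0 '#' = 1 from by simp [fvcStepA]]
      rw [fvcA_pos rest 1 (by omega)]
      simp [fvcBonusLoop, fvcHex_hash]
      ring
    · by_cases h : fvcHex c
      · rw [show fvcStepA 0 c = 1 from by simp [fvcStepA, hh, h]]
        rw [fvcA_pos rest 1 (by omega)]
        simp [fvcBonusLoop, h]
      · rw [show fvcStepA 0 c = 0 from by simp [fvcStepA, hh, h]]
        simp only [fvcBonusLoop, h, Bool.false_eq_true, if_neg hh, reduceIte, zero_add]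
        exact ih t

-- ===== VERDICT (by name: the statement is the Claim_ definition above) =====
theorem field_value_check_hlc_spec : Claim_equal_field_value_check_hlc := by
  intro s _
  unfold Spec_field_value_check_hlc field_value_check_hlc field_value_check_hlc_alt
  have h := fvcA_zero s.toList 0
  simp only [zero_add] at h
  show (if s.toList.foldl fvcStepA 0 = 7 then true else false)
      = decide (fvcBonusLoop s.toList (fvcCnt s.toList) = 7)
  rw [h]
  by_cases h7 : fvcBonusLoop s.toList (fvcCnt s.toList) = 7 <;> simp [h7]
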